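-- pv_equiv track=rewrite | github.com/seher0/allen-ai-kaggle | src/util.py | combination_index
-- ===== SOURCE A (Python) =====
-- import itertools
-- import itertools
--
-- def combination_index(N, n_com):
--     res = []
--     s = ''
--     for i in range(N):
--         s += str(i)
--     for i in range(1, n_com + 1):
--         iter_com = itertools.combinations(s, i)
--         for com in iter_com:
--             com_tmp = [int(c) for c in com]
--             res.append(com_tmp)
--     return res
-- ===== SOURCE B (Python) =====
-- def _choose(xs, need, prefix):
--     # all combinations of `need` elements of xs (positions strictly increasing),
--     # each prefixed by `prefix`, in increasing-position order
--     if need == 0: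
--         return [prefix]
--     if len(xs) < need:
--         return []
--     rest = xs[1:]
--     return _choose(rest, need - 1, prefix + [xs[0]]) + _choose(rest, need, prefix)
--
-- def combination_index(N, n_com):
--     digits = [int(c) for i in range(N) for c in str(i)]
--     out = []
--     for k in range(1, n_com + 1):
--         out += _choose(digits, k, [])
--     return out
-- ===== Notes on version B (the rewrite author's own statement) =====
-- stated objective: alternative
-- what changed: replaces itertools.combinations over the lazily built digit string with a hand-rolled recursive k-subset enumerator (prefix accumulator, suffix recursion with a length prune) over a digit list converted to ints up front
import Mathlib
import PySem

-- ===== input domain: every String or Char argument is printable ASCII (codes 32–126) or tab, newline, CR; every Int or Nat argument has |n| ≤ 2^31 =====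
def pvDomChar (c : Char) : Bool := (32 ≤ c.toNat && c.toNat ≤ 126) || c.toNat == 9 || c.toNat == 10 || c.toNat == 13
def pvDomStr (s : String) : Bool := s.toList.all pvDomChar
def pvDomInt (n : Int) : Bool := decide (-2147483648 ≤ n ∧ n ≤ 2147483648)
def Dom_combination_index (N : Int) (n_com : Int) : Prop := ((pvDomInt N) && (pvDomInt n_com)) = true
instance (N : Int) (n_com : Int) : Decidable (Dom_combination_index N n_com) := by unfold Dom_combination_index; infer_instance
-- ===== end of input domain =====

-- B replaces itertools.combinations with a hand-rolled recursive subset enumerator over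
-- a pre-converted digit list (objective: alternative decomposition, same cost).

-- ===== PORT A =====
-- int(c) for a single char; in both programs c is always a decimal digit, so the
-- ValueError branch of int() (none) is never reached; .getD 0 only totalises the type.
def pvIntOfChar (c : Char) : Int := (PySem.Int.ofStr? (String.ofList [c])).getD 0

-- hand port of itertools.combinations(seq, k) (exact: same elements, same
-- increasing-position order as CPython's itertools.combinations)
def pvCombsA : Nat → List Char → List (List Char)
  | 0, _ => [[]]
  | _ + 1, [] => []
  | k + 1, x :: xs => (pvCombsA k xs).map (fun c => x :: c) ++ pvCombsA (k + 1) xs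

def combination_index (N : Int) (n_com : Int) : List (List Int) :=
  let s : String := (PySem.List.pyRange 0 N 1).foldl (fun s i => s ++ PySem.Int.toStr i) ""
  (PySem.List.pyRange 1 (n_com + 1) 1).foldl
    (fun res i => res ++ (pvCombsA i.toNat s.toList).map (fun com => com.map pvIntOfChar)) []

-- ===== PORT B =====
def pvChoose : List Int → Nat → List Int → List (List Int)
  | _, 0, pre => [pre]
  | xs, k + 1, pre =>
    if xs.length < k + 1 then []
    else
      match xs with
      | [] => []
      | x :: rest => pvChoose rest k (pre ++ [x]) ++ pvChoose rest (k + 1) pre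

def combination_index_alt (N : Int) (n_com : Int) : List (List Int) :=
  let digits : List Int :=
    (PySem.List.pyRange 0 N 1).flatMap (fun i => (PySem.Int.toChars i).map pvIntOfChar)
  (PySem.List.pyRange 1 (n_com + 1) 1).foldl
    (fun out k => out ++ pvChoose digits k.toNat []) []

-- ===== PRECONDITION & SPEC =====
def Spec_combination_index (N : Int) (n_com : Int) (out : List (List Int)) : Prop := out = combination_index_alt N n_com
instance (N : Int) (n_com : Int) (out : List (List Int)) : Decidable (Spec_combination_index N n_com out) := by unfold Spec_combination_index; infer_instance

-- ===== CLAIM (what is proved, stated in full; the proofs are below) =====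
def Claim_equal_combination_index : Prop := ∀ (N : Int) (n_com : Int), Dom_combination_index N n_com → Spec_combination_index N n_com (combination_index N n_com)

-- ===== LEMMAS AND PROOFS =====

lemma pv_toList_fold (r : List Int) :
    ∀ s : String, (r.foldl (fun s i => s ++ PySem.Int.toStr i) s).toList
      = s.toList ++ r.flatMap PySem.Int.toChars := by
  induction r with
  | nil => intro s; simp
  | cons a t ih =>
      intro s
      simp [List.foldl_cons, ih, PySem.Int.toList_toStr]

lemma pvCombsA_nil_of_short : ∀ (xs : List Char) (k : Nat), xs.length < k → pvCombsA k xs = [] := by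
  intro xs
  induction xs with
  | nil =>
      intro k h
      cases k with
      | zero => omega
      | succ k => simp [pvCombsA]
  | cons x t ih =>
      intro k h
      cases k with
      | zero => omega
      | succ k =>
          simp only [List.length_cons] at h
          simp [pvCombsA, ih k (by omega), ih (k + 1) (by omega)]

lemma pvChoose_eq (f : Char → Int) :
    ∀ (xs : List Char) (k : Nat) (pre : List Int),
      pvChoose (xs.map f) k pre = (pvCombsA k xs).map (fun c => pre ++ c.map f) := by
  intro xs
  induction xs with
  | nil =>
      intro k pre
      cases k with
      | zero => simp [pvChoose, pvCombsA]
      | succ k => simp [pvChoose, pvCombsA]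
  | cons x t ih =>
      intro k pre
      cases k with
      | zero => simp [pvChoose, pvCombsA]
      | succ k =>
          by_cases h : t.length < k
          · have h1 : pvCombsA k t = [] := pvCombsA_nil_of_short t k h
            have h2 : pvCombsA (k + 1) t = [] := pvCombsA_nil_of_short t (k + 1) (by omega)
            simp [pvChoose, pvCombsA, h, h1, h2]
          · simp only [List.map_cons, pvChoose, List.length_cons, List.length_map]
            rw [if_neg (by omega)]
            rw [ih k (pre ++ [f x]), ih (k + 1) pre]
            simp [pvCombsA, Function.comp, List.append_assoc]

lemma combination_index_eq (N : Int) (n_com : Int) :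
    combination_index N n_com = combination_index_alt N n_com := by
  unfold combination_index combination_index_alt
  have hs : ((PySem.List.pyRange 0 N 1).foldl (fun s i => s ++ PySem.Int.toStr i) "").toList
      = (PySem.List.pyRange 0 N 1).flatMap PySem.Int.toChars := by
    simpa using pv_toList_fold (PySem.List.pyRange 0 N 1) ""
  have hd : (PySem.List.pyRange 0 N 1).flatMap (fun i => (PySem.Int.toChars i).map pvIntOfChar)
      = ((PySem.List.pyRange 0 N 1).flatMap PySem.Int.toChars).map pvIntOfChar := by
    simp [List.map_flatMap]
  have hstep : (fun (res : List (List Int)) (i : Int) =>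
        res ++ (pvCombsA i.toNat
          ((PySem.List.pyRange 0 N 1).foldl (fun s i => s ++ PySem.Int.toStr i) "").toList).map
            (fun com => com.map pvIntOfChar))
      = (fun (out : List (List Int)) (k : Int) =>
        out ++ pvChoose
          ((PySem.List.pyRange 0 N 1).flatMap (fun i => (PySem.Int.toChars i).map pvIntOfChar))
          k.toNat []) := by
    funext res i
    rw [hs, hd, pvChoose_eq pvIntOfChar]
    simp
  simp only [hstep]

-- ===== VERDICT (by name: the statement is the Claim_ definition above) =====
theorem combination_index_spec : Claim_equal_combination_index := by
  intro N n_com _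
  unfold Spec_combination_index
  exact combination_index_eq N n_com
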